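-- pv_equiv track=rewrite | github.com/0xCullinan/lyrical-lattice | src/detection/phonetic_detectors.py | extract_rhyme_portion
-- ===== SOURCE A (Python) =====
-- ARPABET_VOWELS = {
--     'AA', 'AE', 'AH', 'AO', 'AW', 'AY', 'EH', 'ER', 'EY',
--     'IH', 'IY', 'OW', 'OY', 'UH', 'UW'
-- }
--
-- def strip_stress(phoneme: str) -> str:
--     """Remove stress marker (0, 1, 2) from phoneme"""
--     return phoneme.rstrip('012')
--
-- def get_stress(phoneme: str) -> int:
--     """Get stress level from phoneme (0, 1, or 2)"""
--     if phoneme and phoneme[-1].isdigit():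
--         return int(phoneme[-1])
--     return 0
--
-- def extract_rhyme_portion(phonemes: list[str]) -> list[str]:
--     """Extract rhyme portion from phonemes."""
--     last_stressed_idx = -1
--
--     for i, phone in enumerate(phonemes):
--         base = strip_stress(phone)
--         stress = get_stress(phone)
--
--         if base in ARPABET_VOWELS and stress in (1, 2):
--             last_stressed_idx = i
--
--     if last_stressed_idx == -1:
--         for i in range(len(phonemes) - 1, -1, -1):
--             if strip_stress(phonemes[i]) in ARPABET_VOWELS:
--                 last_stressed_idx = i
--                 break
--
--     if last_stressed_idx == -1:
--         return []
--
--     return phonemes[last_stressed_idx:]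
-- ===== SOURCE B (Python) =====
-- ARPABET_VOWELS = {
--     'AA', 'AE', 'AH', 'AO', 'AW', 'AY', 'EH', 'ER', 'EY',
--     'IH', 'IY', 'OW', 'OY', 'UH', 'UW'
-- }
--
-- def strip_stress(phoneme: str) -> str:
--     """Remove stress marker (0, 1, 2) from phoneme"""
--     return phoneme.rstrip('012')
--
-- def get_stress(phoneme: str) -> int:
--     """Get stress level from phoneme (0, 1, or 2)"""
--     if phoneme and phoneme[-1].isdigit():
--         return int(phoneme[-1])
--     return 0
--
-- def extract_rhyme_portion(phonemes: list[str]) -> list[str]: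
--     """Extract rhyme portion from phonemes: single backward pass with early exit."""
--     fallback = -1
--     for i in range(len(phonemes) - 1, -1, -1):
--         phone = phonemes[i]
--         if strip_stress(phone) in ARPABET_VOWELS:
--             if get_stress(phone) in (1, 2):
--                 return phonemes[i:]
--             if fallback == -1:
--                 fallback = i
--     return phonemes[fallback:] if fallback != -1 else []
-- ===== Notes on version B (the rewrite author's own statement) =====
-- stated objective: alternative
-- what changed: A's two separate scans (a full forward pass recording the last stressed vowel, then a backward pass for a fallback vowel) are merged into one backward pass that returns immediately at the first stressed vowel and remembers the topmost plain vowel as fallback.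
import Mathlib
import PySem

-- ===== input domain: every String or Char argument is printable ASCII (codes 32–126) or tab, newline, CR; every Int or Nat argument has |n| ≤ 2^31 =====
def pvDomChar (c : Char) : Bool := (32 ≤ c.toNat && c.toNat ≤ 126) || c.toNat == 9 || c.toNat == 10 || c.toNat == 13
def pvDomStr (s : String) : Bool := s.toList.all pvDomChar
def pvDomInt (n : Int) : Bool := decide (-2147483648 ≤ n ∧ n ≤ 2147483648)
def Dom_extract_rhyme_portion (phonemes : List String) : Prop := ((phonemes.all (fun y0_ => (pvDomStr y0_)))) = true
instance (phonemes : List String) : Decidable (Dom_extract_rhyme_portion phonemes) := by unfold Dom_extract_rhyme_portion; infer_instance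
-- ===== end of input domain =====

-- B replaces A's forward last-stressed scan plus separate backward fallback scan by ONE
-- backward pass with early exit (objective: alternative decomposition; same asymptotic cost).

-- ===== PORT A =====
def pvVowels : PySem.Set String := PySem.Set.ofList
  ["AA", "AE", "AH", "AO", "AW", "AY", "EH", "ER", "EY",
   "IH", "IY", "OW", "OY", "UH", "UW"]

-- phoneme.rstrip('012'): hand port (drop trailing '0'/'1'/'2'); exact, rstrip with explicit chars
def strip_stress (phoneme : String) : String :=
  String.ofList ((phoneme.toList.reverse.dropWhile (fun c => c == '0' || c == '1' || c == '2')).reverse)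

-- get_stress: int(phoneme[-1]) when the last char is a digit; c.toNat - 48 is int(c) for an ASCII digit (exact on Dom)
def get_stress (phoneme : String) : Int :=
  match phoneme.toList.getLast? with
  | some c => if PySem.Chars.isdigit c then ((c.toNat : Int) - 48) else 0
  | none => 0

-- A's second loop: for i in range(len(phonemes)-1, -1, -1): ... break  (countdown, first hit from the top)
def pvFindVowelRev (ps : List String) : Nat → Int
  | 0 => -1
  | k + 1 =>
    if PySem.Set.contains pvVowels (strip_stress (PySem.List.pyGetD ps (k : Int) "")) then (k : Int)
    else pvFindVowelRev ps k

def extract_rhyme_portion (phonemes : List String) : List String :=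
  let lsi := (PySem.List.enumerate phonemes 0).foldl
    (fun acc ip =>
      let base := strip_stress ip.2
      let stress := get_stress ip.2
      if PySem.Set.contains pvVowels base && (stress == 1 || stress == 2) then ip.1 else acc)
    (-1)
  let lsi2 := if lsi = -1 then pvFindVowelRev phonemes phonemes.length else lsi
  if lsi2 = -1 then [] else PySem.List.slice phonemes (some lsi2) none

-- ===== PORT B =====
-- B's single backward loop: early return on a stressed vowel, remember the topmost vowel as fallback
def pvScanRev (ps : List String) : Nat → Int → List String
  | 0, fb => if fb = -1 then [] else PySem.List.slice ps (some fb) none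
  | k + 1, fb =>
    let phone := PySem.List.pyGetD ps (k : Int) ""
    if PySem.Set.contains pvVowels (strip_stress phone) then
      if get_stress phone == 1 || get_stress phone == 2 then
        PySem.List.slice ps (some (k : Int)) none
      else pvScanRev ps k (if fb = -1 then (k : Int) else fb)
    else pvScanRev ps k fb

def extract_rhyme_portion_alt (phonemes : List String) : List String :=
  pvScanRev phonemes phonemes.length (-1)

-- ===== PRECONDITION & SPEC =====
def Spec_extract_rhyme_portion (phonemes : List String) (out : List String) : Prop := out = extract_rhyme_portion_alt phonemes
instance (phonemes : List String) (out : List String) : Decidable (Spec_extract_rhyme_portion phonemes out) := by unfold Spec_extract_rhyme_portion; infer_instance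

-- ===== CLAIM (what is proved, stated in full; the proofs are below) =====
def Claim_equal_extract_rhyme_portion : Prop := ∀ (phonemes : List String), Dom_extract_rhyme_portion phonemes → Spec_extract_rhyme_portion phonemes (extract_rhyme_portion phonemes)

-- ===== LEMMAS AND PROOFS =====

-- proof-side names for the two Bool tests both ports perform
def pvC2 (p : String) : Bool := PySem.Set.contains pvVowels (strip_stress p)
def pvS (p : String) : Bool := get_stress p == 1 || get_stress p == 2
def pvC1 (p : String) : Bool := pvC2 p && pvS p

-- proof-side: countdown first index below k (from the top) carrying a stressed vowel, else -1
def pvG1 (ps : List String) : Nat → Int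
  | 0 => -1
  | k + 1 => if pvC1 (PySem.List.pyGetD ps (k : Int) "") then (k : Int) else pvG1 ps k

lemma pvG1_succ (ps : List String) (k : Nat) :
    pvG1 ps (k + 1) = if pvC1 (PySem.List.pyGetD ps (k : Int) "") = true then (k : Int) else pvG1 ps k := rfl

lemma pvFindVowelRev_succ (ps : List String) (k : Nat) :
    pvFindVowelRev ps (k + 1) =
      if pvC2 (PySem.List.pyGetD ps (k : Int) "") = true then (k : Int) else pvFindVowelRev ps k := rfl

lemma pvScanRev_succ (ps : List String) (k : Nat) (fb : Int) :
    pvScanRev ps (k + 1) fb =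
      if pvC2 (PySem.List.pyGetD ps (k : Int) "") = true then
        (if pvS (PySem.List.pyGetD ps (k : Int) "") = true then
          PySem.List.slice ps (some (k : Int)) none
        else pvScanRev ps k (if fb = -1 then (k : Int) else fb))
      else pvScanRev ps k fb := rfl

lemma pvG1_append (ps : List String) (x : String) :
    ∀ k, k ≤ ps.length → pvG1 (ps ++ [x]) k = pvG1 ps k := by
  intro k hk
  induction k with
  | zero => rfl
  | succ k ih =>
    have hk' : k < ps.length := hk
    have hget : PySem.List.pyGetD (ps ++ [x]) (k : Int) "" = PySem.List.pyGetD ps (k : Int) "" := by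
      simp [PySem.List.pyGetD_natCast, List.getD, List.getElem?_append_left hk']
    rw [pvG1_succ, pvG1_succ, hget, ih (Nat.le_of_lt hk')]

lemma foldl_eq_pvG1 (ps : List String) :
    (PySem.List.enumerate ps 0).foldl
      (fun acc ip =>
        let base := strip_stress ip.2
        let stress := get_stress ip.2
        if PySem.Set.contains pvVowels base && (stress == 1 || stress == 2) then ip.1 else acc)
      (-1) = pvG1 ps ps.length := by
  show (PySem.List.enumerate ps 0).foldl
      (fun acc ip => if pvC1 ip.2 = true then ip.1 else acc) (-1) = pvG1 ps ps.length
  induction ps using List.reverseRecOn with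
  | nil => rfl
  | append_singleton ps x ih =>
    rw [PySem.List.enumerate_append, List.foldl_append, ih]
    have hget : PySem.List.pyGetD (ps ++ [x]) (ps.length : Int) "" = x := by
      simp [PySem.List.pyGetD_natCast, List.getD]
    have hlen : (ps ++ [x]).length = ps.length + 1 := by simp
    rw [hlen, pvG1_succ, hget, pvG1_append ps x ps.length (le_refl _)]
    simp [PySem.List.enumerate, List.foldl]

lemma pvScanRev_of_stressed (ps : List String) :
    ∀ k fb, pvG1 ps k ≠ -1 →
      pvScanRev ps k fb = PySem.List.slice ps (some (pvG1 ps k)) none := by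
  intro k
  induction k with
  | zero => intro fb h; simp [pvG1] at h
  | succ k ih =>
    intro fb h
    rw [pvG1_succ] at h ⊢
    rw [pvScanRev_succ]
    cases hv : pvC2 (PySem.List.pyGetD ps (k : Int) "") with
    | true =>
      cases hs : pvS (PySem.List.pyGetD ps (k : Int) "") with
      | true =>
        have hc1 : pvC1 (PySem.List.pyGetD ps (k : Int) "") = true := by
          unfold pvC1; rw [hv, hs]; decide
        rw [if_pos hc1, if_pos rfl, if_pos rfl]
      | false =>
        have hc1 : ¬ pvC1 (PySem.List.pyGetD ps (k : Int) "") = true := by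
          unfold pvC1; rw [hs, Bool.and_false]; decide
        rw [if_neg hc1] at h ⊢
        simp only [Bool.false_eq_true, if_true, if_false]
        exact ih _ h
    | false =>
      have hc1 : ¬ pvC1 (PySem.List.pyGetD ps (k : Int) "") = true := by
        unfold pvC1; rw [hv, Bool.false_and]; decide
      rw [if_neg hc1] at h ⊢
      simp only [Bool.false_eq_true, if_false]
      exact ih _ h

lemma pvScanRev_of_unstressed (ps : List String) :
    ∀ k fb, pvG1 ps k = -1 →
      pvScanRev ps k fb =
        if pvFindVowelRev ps k = -1 then
          (if fb = -1 then [] else PySem.List.slice ps (some fb) none)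
        else
          (if fb = -1 then PySem.List.slice ps (some (pvFindVowelRev ps k)) none
           else PySem.List.slice ps (some fb) none) := by
  intro k
  induction k with
  | zero => intro fb _; simp [pvScanRev, pvFindVowelRev]
  | succ k ih =>
    intro fb h
    rw [pvG1_succ] at h
    rw [pvScanRev_succ, pvFindVowelRev_succ]
    have hknz : ¬((k : Int) = -1) := by omega
    cases hv : pvC2 (PySem.List.pyGetD ps (k : Int) "") with
    | true =>
      cases hs : pvS (PySem.List.pyGetD ps (k : Int) "") with
      | true =>
        exfalso
        have hc1 : pvC1 (PySem.List.pyGetD ps (k : Int) "") = true := by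
          unfold pvC1; rw [hv, hs]; decide
        rw [if_pos hc1] at h
        exact hknz h
      | false =>
        have hc1 : ¬ pvC1 (PySem.List.pyGetD ps (k : Int) "") = true := by
          unfold pvC1; rw [hs, Bool.and_false]; decide
        rw [if_neg hc1] at h
        simp only [Bool.false_eq_true, if_true, if_false]
        rw [if_neg hknz, ih _ h]
        by_cases hfb : fb = -1
        · rw [if_pos hfb, if_pos hfb]
          by_cases hf : pvFindVowelRev ps k = -1
          · rw [if_pos hf, if_neg hknz]
          · rw [if_neg hf, if_neg hknz]
        · rw [if_neg hfb, if_neg hfb]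
          by_cases hf : pvFindVowelRev ps k = -1
          · rw [if_pos hf, if_neg hfb]
          · rw [if_neg hf, if_neg hfb, if_neg hfb]
    | false =>
      have hc1 : ¬ pvC1 (PySem.List.pyGetD ps (k : Int) "") = true := by
        unfold pvC1; rw [hv, Bool.false_and]; decide
      rw [if_neg hc1] at h
      simp only [Bool.false_eq_true, if_false]
      exact ih _ h

-- ===== VERDICT (by name: the statement is the Claim_ definition above) =====
theorem extract_rhyme_portion_spec : Claim_equal_extract_rhyme_portion := by
  intro phonemes _
  unfold Spec_extract_rhyme_portion extract_rhyme_portion extract_rhyme_portion_alt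
  rw [foldl_eq_pvG1]
  show (if (if pvG1 phonemes phonemes.length = -1 then pvFindVowelRev phonemes phonemes.length
              else pvG1 phonemes phonemes.length) = -1 then []
        else PySem.List.slice phonemes
          (some (if pvG1 phonemes phonemes.length = -1 then pvFindVowelRev phonemes phonemes.length
                 else pvG1 phonemes phonemes.length)) none)
      = pvScanRev phonemes phonemes.length (-1)
  by_cases h : pvG1 phonemes phonemes.length = -1
  · rw [if_pos h, pvScanRev_of_unstressed phonemes phonemes.length (-1) h]
    by_cases hf : pvFindVowelRev phonemes phonemes.length = -1
    · rw [if_pos hf, if_pos hf, if_pos rfl]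
    · rw [if_neg hf, if_neg hf, if_pos rfl]
  · rw [if_neg h, if_neg h, pvScanRev_of_stressed phonemes phonemes.length (-1) h]
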